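-- pv_equiv track=rewrite | github.com/kxnkxv/Fast-F1-Bot | backend/bot/handlers/favorites.py | _match_team
-- ===== SOURCE A (Python) =====
-- TEAM_DISPLAY_NAMES: dict[str, str] = {
--     "redbullracing": "Red Bull",
--     "mercedes": "Mercedes",
--     "ferrari": "Ferrari",
--     "mclaren": "McLaren",
--     "astonmartin": "Aston Martin",
--     "alpine": "Alpine",
--     "williams": "Williams",
--     "rb": "RB",
--     "kicksauber": "Kick Sauber",
--     "haasf1team": "Haas",
-- }
--
-- def _match_team(query: str) -> str | None:
--     """Match a partial team name/slug to a known team slug."""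
--     query = query.lower().replace(" ", "")
--     for slug in TEAM_DISPLAY_NAMES:
--         if query in slug or slug.startswith(query):
--             return slug
--     for slug, name in TEAM_DISPLAY_NAMES.items():
--         if query in name.lower().replace(" ", ""):
--             return slug
--     return None
-- ===== SOURCE B (Python) =====
-- TEAM_DISPLAY_NAMES: dict[str, str] = {
--     "redbullracing": "Red Bull",
--     "mercedes": "Mercedes",
--     "ferrari": "Ferrari",
--     "mclaren": "McLaren",
--     "astonmartin": "Aston Martin",
--     "alpine": "Alpine",
--     "williams": "Williams",
--     "rb": "RB",
--     "kicksauber": "Kick Sauber",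
--     "haasf1team": "Haas",
-- }
--
-- def _match_team(query):
--     """Match a partial team name/slug to a known team slug, in one pass."""
--     query = query.lower().replace(" ", "")
--     slug_hit = None
--     name_hit = None
--     for slug, name in TEAM_DISPLAY_NAMES.items():
--         if slug_hit is None and query in slug:
--             slug_hit = slug
--         if name_hit is None and query in name.lower().replace(" ", ""):
--             name_hit = slug
--     return slug_hit if slug_hit is not None else name_hit
-- ===== Notes on version B (the rewrite author's own statement) =====
-- stated objective: alternative
-- what changed: Replaced A's two sequential scans of the dict (first-return on slug match, then first-return on normalized-name match) by a single pass over the items that tracks the first slug hit and the first name hit in two set-once variables, returning the slug hit with priority after the loop.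
import Mathlib
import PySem

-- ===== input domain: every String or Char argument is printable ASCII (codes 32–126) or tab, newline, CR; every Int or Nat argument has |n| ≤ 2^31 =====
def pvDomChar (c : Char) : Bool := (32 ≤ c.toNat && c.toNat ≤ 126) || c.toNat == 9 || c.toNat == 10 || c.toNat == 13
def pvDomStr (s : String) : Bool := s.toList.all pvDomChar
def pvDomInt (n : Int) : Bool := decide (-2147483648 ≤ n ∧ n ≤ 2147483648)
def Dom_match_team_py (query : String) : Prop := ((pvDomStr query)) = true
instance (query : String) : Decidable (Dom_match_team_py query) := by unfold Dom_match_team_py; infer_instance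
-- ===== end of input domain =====

-- B merges A's two sequential scans of the dict into one pass tracking two set-once candidates; same result, same cost.
-- ===== PORT A =====
def teamDisplayNames : PySem.Dict String String := PySem.Dict.ofList
  [("redbullracing", "Red Bull"), ("mercedes", "Mercedes"), ("ferrari", "Ferrari"),
   ("mclaren", "McLaren"), ("astonmartin", "Aston Martin"), ("alpine", "Alpine"),
   ("williams", "Williams"), ("rb", "RB"), ("kicksauber", "Kick Sauber"),
   ("haasf1team", "Haas")]

-- first loop: 'for slug in TEAM_DISPLAY_NAMES: if query in slug or slug.startswith(query): return slug'
def matchTeamLoop1 (q : String) : List String → Option String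
  | [] => none
  | slug :: rest =>
    if PySem.Str.isIn q slug || PySem.Str.startswith slug q then some slug
    else matchTeamLoop1 q rest

-- second loop: 'for slug, name in TEAM_DISPLAY_NAMES.items(): if query in name.lower().replace(" ",""): return slug'
def matchTeamLoop2 (q : String) : List (String × String) → Option String
  | [] => none
  | (slug, name) :: rest =>
    if PySem.Str.isIn q (PySem.Str.replace (PySem.Str.lower name) " " "") then some slug
    else matchTeamLoop2 q rest

def match_team_py (query : String) : Option String :=
  let q := PySem.Str.replace (PySem.Str.lower query) " " ""
  match matchTeamLoop1 q teamDisplayNames.keys with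
  | some slug => some slug
  | none => matchTeamLoop2 q teamDisplayNames.items

-- ===== PORT B =====
-- one pass over the items, tracking the first slug hit and the first name hit (set-once variables)
def matchTeamAltLoop (q : String) (items : List (String × String))
    (sh nh : Option String) : Option String × Option String :=
  match items with
  | [] => (sh, nh)
  | (slug, name) :: rest =>
    matchTeamAltLoop q rest
      (if sh.isNone && PySem.Str.isIn q slug then some slug else sh)
      (if nh.isNone && PySem.Str.isIn q (PySem.Str.replace (PySem.Str.lower name) " " "")
         then some slug else nh)

def match_team_py_alt (query : String) : Option String :=
  let q := PySem.Str.replace (PySem.Str.lower query) " " ""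
  match matchTeamAltLoop q teamDisplayNames.items none none with
  | (some slug, _) => some slug
  | (none, nh) => nh

-- ===== PRECONDITION & SPEC =====
def Spec_match_team_py (query : String) (out : Option String) : Prop := out = match_team_py_alt query
instance (query : String) (out : Option String) : Decidable (Spec_match_team_py query out) := by unfold Spec_match_team_py; infer_instance

-- ===== CLAIM (what is proved, stated in full; the proofs are below) =====
def Claim_equal_match_team_py : Prop := ∀ (query : String), Dom_match_team_py query → Spec_match_team_py query (match_team_py query)

-- ===== LEMMAS AND PROOFS =====

-- In A's first loop the 'slug.startswith(query)' disjunct is subsumed by 'query in slug'.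
theorem cond_subsume (q slug : String) :
    (PySem.Str.isIn q slug || PySem.Str.startswith slug q) = PySem.Str.isIn q slug := by
  cases h : PySem.Str.isIn q slug with
  | true => simp
  | false =>
    simp only [Bool.false_or]
    cases h2 : PySem.Str.startswith slug q with
    | false => rfl
    | true =>
      exfalso
      have hp : q.toList <+: slug.toList :=
        (PySem.Chars.startswith_iff slug.toList q.toList).mp (by simpa using h2)
      have hin := (PySem.Str.isIn_iff_infix q slug).mpr hp.isInfix
      rw [h] at hin
      exact Bool.false_ne_true hin

-- B's first tracked candidate equals 'first remaining slug match', seeded by the accumulator.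
theorem altLoop_fst (q : String) : ∀ (items : List (String × String)) (sh nh : Option String),
    (matchTeamAltLoop q items sh nh).1 =
      (sh.orElse fun _ => matchTeamLoop1 q (items.map Prod.fst)) := by
  intro items
  induction items with
  | nil => intro sh nh; cases sh <;> simp [matchTeamAltLoop, matchTeamLoop1]
  | cons p rest ih =>
    intro sh nh
    obtain ⟨slug, name⟩ := p
    cases sh with
    | some s => simp [matchTeamAltLoop, ih]
    | none =>
      simp only [matchTeamAltLoop, ih, List.map, matchTeamLoop1, cond_subsume]
      cases h : PySem.Str.isIn q slug <;> simp

-- B's second tracked candidate equals A's second loop, seeded by the accumulator.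
theorem altLoop_snd (q : String) : ∀ (items : List (String × String)) (sh nh : Option String),
    (matchTeamAltLoop q items sh nh).2 =
      (nh.orElse fun _ => matchTeamLoop2 q items) := by
  intro items
  induction items with
  | nil => intro sh nh; cases nh <;> simp [matchTeamAltLoop, matchTeamLoop2]
  | cons p rest ih =>
    intro sh nh
    obtain ⟨slug, name⟩ := p
    cases nh with
    | some s => simp [matchTeamAltLoop, ih]
    | none =>
      simp only [matchTeamAltLoop, ih, matchTeamLoop2]
      cases h : PySem.Str.isIn q (PySem.Str.replace (PySem.Str.lower name) " " "") <;> simp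

theorem keys_eq_map_fst :
    teamDisplayNames.keys = teamDisplayNames.items.map Prod.fst := by decide

-- ===== VERDICT (by name: the statement is the Claim_ definition above) =====
theorem match_eq (q : String) :
    (match matchTeamLoop1 q teamDisplayNames.keys with
     | some slug => some slug
     | none => matchTeamLoop2 q teamDisplayNames.items) =
    (match matchTeamAltLoop q teamDisplayNames.items none none with
     | (some slug, _) => some slug
     | (none, nh) => nh) := by
  cases hA : matchTeamAltLoop q teamDisplayNames.items none none with
  | mk a b =>
    have h1 : a = matchTeamLoop1 q teamDisplayNames.keys := by
      have := altLoop_fst q teamDisplayNames.items none none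
      rw [hA] at this
      simpa [keys_eq_map_fst] using this
    have h2 : b = matchTeamLoop2 q teamDisplayNames.items := by
      have := altLoop_snd q teamDisplayNames.items none none
      rw [hA] at this
      simpa using this
    rw [← h1, ← h2]
    cases a <;> simp

theorem match_team_py_spec : Claim_equal_match_team_py := by
  intro query _
  unfold Spec_match_team_py match_team_py match_team_py_alt
  exact match_eq (PySem.Str.replace (PySem.Str.lower query) " " "")
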